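-- pv_equiv track=rewrite | github.com/soul-traveller/github-traffic-dashboard | scripts/generate_dashboard.py | calculate_lifetime_stats
-- ===== SOURCE A (Python) =====
-- from typing import Dict, List, Any, Tuple  # For type annotations
--
-- def calculate_lifetime_stats(daily_data: List[Dict[str, Any]]) -> Dict[str, int]:
--     """
--     Calculate lifetime statistics from all available daily data.
--
--     This function sums up all clones and views across the entire
--     historical data set.
--
--     Args:
--         daily_data: List of all daily data entries
--
--     Returns:
--         Dictionary with keys: clones_total, clones_unique, views_total, views_unique
--     """
--     # Return zeros if no data available
--     if not daily_data:
--         return {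
--             'clones_total': 0,
--             'clones_unique': 0,
--             'views_total': 0,
--             'views_unique': 0
--         }
--
--     # Initialize statistics counters
--     stats = {
--         'clones_total': 0,
--         'clones_unique': 0,
--         'views_total': 0,
--         'views_unique': 0
--     }
--
--     # Sum up statistics for all entries
--     for entry in daily_data:
--         stats['clones_total'] += entry.get('clones_total', 0)
--         stats['clones_unique'] += entry.get('clones_unique', 0)
--         stats['views_total'] += entry.get('views_total', 0)
--         stats['views_unique'] += entry.get('views_unique', 0)
--
--     return stats
-- ===== SOURCE B (Python) =====
-- def calculate_lifetime_stats(daily_data):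
--     keys = ('clones_total', 'clones_unique', 'views_total', 'views_unique')
--     return {k: sum(e.get(k, 0) for e in daily_data) for k in keys}
-- ===== Notes on version B (the rewrite author's own statement) =====
-- stated objective: simpler
-- what changed: Replaces the empty-list guard plus one fused four-counter accumulation loop with a dict comprehension doing one independent summation pass per key (sum over an empty list is already 0).
import Mathlib
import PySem

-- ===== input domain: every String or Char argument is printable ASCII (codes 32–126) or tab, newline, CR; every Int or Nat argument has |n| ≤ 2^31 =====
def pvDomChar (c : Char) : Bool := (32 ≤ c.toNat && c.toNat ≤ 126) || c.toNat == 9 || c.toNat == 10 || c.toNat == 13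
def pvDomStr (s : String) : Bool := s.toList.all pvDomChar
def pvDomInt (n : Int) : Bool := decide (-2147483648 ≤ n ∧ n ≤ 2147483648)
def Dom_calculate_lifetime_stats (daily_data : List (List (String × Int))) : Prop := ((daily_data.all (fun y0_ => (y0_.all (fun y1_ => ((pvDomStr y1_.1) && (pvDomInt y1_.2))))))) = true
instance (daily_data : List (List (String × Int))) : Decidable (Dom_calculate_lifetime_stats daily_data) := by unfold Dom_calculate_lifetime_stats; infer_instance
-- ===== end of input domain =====

-- B replaces A's empty-list guard and fused four-counter loop with one independent summation pass per key (simpler decomposition, same O(n) cost).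


-- ===== PORT A =====
-- A's loop body: stats['k'] += entry.get(k, 0) for each of the four keys, in order
def statStep (stats : PySem.Dict String Int) (entry : List (String × Int)) : PySem.Dict String Int :=
  let e := PySem.Dict.mk entry
  let s1 := stats.insert "clones_total" (stats.getD "clones_total" 0 + e.getD "clones_total" 0)
  let s2 := s1.insert "clones_unique" (s1.getD "clones_unique" 0 + e.getD "clones_unique" 0)
  let s3 := s2.insert "views_total" (s2.getD "views_total" 0 + e.getD "views_total" 0)
  s3.insert "views_unique" (s3.getD "views_unique" 0 + e.getD "views_unique" 0)

def calculate_lifetime_stats (daily_data : List (List (String × Int))) : List (String × Int) :=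
  if daily_data.isEmpty then
    [("clones_total", 0), ("clones_unique", 0), ("views_total", 0), ("views_unique", 0)]
  else
    (daily_data.foldl statStep
      (PySem.Dict.mk [("clones_total", 0), ("clones_unique", 0), ("views_total", 0), ("views_unique", 0)])).items

-- ===== PORT B =====
-- one independent summation pass per key
def calculate_lifetime_stats_alt (daily_data : List (List (String × Int))) : List (String × Int) :=
  ["clones_total", "clones_unique", "views_total", "views_unique"].map
    (fun k => (k, (daily_data.map (fun e => (PySem.Dict.mk e).getD k 0)).sum))

-- ===== PRECONDITION & SPEC =====
def Spec_calculate_lifetime_stats (daily_data : List (List (String × Int))) (out : List (String × Int)) : Prop := out = calculate_lifetime_stats_alt daily_data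
instance (daily_data : List (List (String × Int))) (out : List (String × Int)) : Decidable (Spec_calculate_lifetime_stats daily_data out) := by unfold Spec_calculate_lifetime_stats; infer_instance

-- ===== CLAIM (what is proved, stated in full; the proofs are below) =====
def Claim_equal_calculate_lifetime_stats : Prop := ∀ (daily_data : List (List (String × Int))), Dom_calculate_lifetime_stats daily_data → Spec_calculate_lifetime_stats daily_data (calculate_lifetime_stats daily_data)

-- ===== LEMMAS AND PROOFS =====
lemma foldl_statStep (dd : List (List (String × Int))) (a b c d : Int) :
    (dd.foldl statStep (PySem.Dict.mk
        [("clones_total", a), ("clones_unique", b), ("views_total", c), ("views_unique", d)])).items =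
      [("clones_total", a + (dd.map (fun e => (PySem.Dict.mk e).getD "clones_total" 0)).sum),
       ("clones_unique", b + (dd.map (fun e => (PySem.Dict.mk e).getD "clones_unique" 0)).sum),
       ("views_total", c + (dd.map (fun e => (PySem.Dict.mk e).getD "views_total" 0)).sum),
       ("views_unique", d + (dd.map (fun e => (PySem.Dict.mk e).getD "views_unique" 0)).sum)] := by
  induction dd generalizing a b c d with
  | nil => simp
  | cons e dd ih =>
    have hstep : statStep (PySem.Dict.mk
        [("clones_total", a), ("clones_unique", b), ("views_total", c), ("views_unique", d)]) e =
      PySem.Dict.mk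
        [("clones_total", a + (PySem.Dict.mk e).getD "clones_total" 0),
         ("clones_unique", b + (PySem.Dict.mk e).getD "clones_unique" 0),
         ("views_total", c + (PySem.Dict.mk e).getD "views_total" 0),
         ("views_unique", d + (PySem.Dict.mk e).getD "views_unique" 0)] := rfl
    simp only [List.foldl_cons, hstep, ih, List.map_cons, List.sum_cons]
    ring_nf

-- ===== VERDICT (by name: the statement is the Claim_ definition above) =====
theorem calculate_lifetime_stats_spec : Claim_equal_calculate_lifetime_stats := by
  intro dd _
  unfold Spec_calculate_lifetime_stats calculate_lifetime_stats calculate_lifetime_stats_alt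
  split
  · next h => simp [List.isEmpty_iff.mp h]
  · simp [foldl_statStep]
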